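-- pv_equiv track=rewrite | github.com/SHI-Labs/NATTEN | tests/utils.py | get_forward_permutation
-- ===== SOURCE A (Python) =====
-- def get_forward_permutation(tiled_shape, offset):
--
--     permuted_indices = list()
--     permuted_shape = list()
--
--     for i in range(len(tiled_shape)):
--         if i % 3 in [0, 2]:
--             permuted_indices.append(offset + i)
--             permuted_shape.append(tiled_shape[i])
--
--     for i in range(len(tiled_shape)):
--         if i % 3 == 1:
--             permuted_indices.append(offset + i)
--             permuted_shape.append(tiled_shape[i])
--
--     return permuted_indices, permuted_shape
-- ===== SOURCE B (Python) =====
-- def get_forward_permutation(tiled_shape, offset):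
--     # One pass: partition indices into 'rest' (i % 3 in {0, 2}) and 'ones' (i % 3 == 1)
--     # buckets, then concatenate rest-before-ones.
--     rest_idx, rest_shape = [], []
--     ones_idx, ones_shape = [], []
--     for i, dim in enumerate(tiled_shape):
--         if i % 3 == 1:
--             ones_idx.append(offset + i)
--             ones_shape.append(dim)
--         else:
--             rest_idx.append(offset + i)
--             rest_shape.append(dim)
--     return rest_idx + ones_idx, rest_shape + ones_shape
-- ===== Notes on version B (the rewrite author's own statement) =====
-- stated objective: alternative
-- what changed: Replaces A's two full index scans with a single enumerate pass that partitions indices and dims into two bucket pairs and concatenates them rest-before-ones.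
import Mathlib
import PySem

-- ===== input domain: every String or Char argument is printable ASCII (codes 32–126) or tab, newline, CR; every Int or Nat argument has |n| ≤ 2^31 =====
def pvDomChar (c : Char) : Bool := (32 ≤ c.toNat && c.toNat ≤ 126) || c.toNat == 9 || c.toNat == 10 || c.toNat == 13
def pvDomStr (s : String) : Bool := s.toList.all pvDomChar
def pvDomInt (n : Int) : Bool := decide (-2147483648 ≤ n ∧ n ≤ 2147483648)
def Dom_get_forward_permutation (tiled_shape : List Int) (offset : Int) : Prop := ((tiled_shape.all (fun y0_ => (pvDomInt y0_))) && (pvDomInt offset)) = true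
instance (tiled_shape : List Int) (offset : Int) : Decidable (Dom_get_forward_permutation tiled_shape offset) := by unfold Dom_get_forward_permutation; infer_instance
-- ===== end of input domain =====

-- B replaces A's two full index scans by a single enumerate pass that partitions
-- into two bucket pairs and concatenates (rest before ones); same return value.

-- ===== PORT A =====
-- Two passes over range(len(tiled_shape)); tiled_shape[i] is always in range, so
-- pyGetD with default 0 is exact here.
def get_forward_permutation (tiled_shape : List Int) (offset : Int) : List Int × List Int :=
  let n : Int := (tiled_shape.length : Int)
  let pass1 := (PySem.List.pyRange 0 n 1).foldl
    (fun (acc : List Int × List Int) i =>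
      if PySem.Int.mod i 3 == 0 || PySem.Int.mod i 3 == 2 then
        (acc.1 ++ [offset + i], acc.2 ++ [PySem.List.pyGetD tiled_shape i 0])
      else acc) ([], [])
  let pass2 := (PySem.List.pyRange 0 n 1).foldl
    (fun (acc : List Int × List Int) i =>
      if PySem.Int.mod i 3 == 1 then
        (acc.1 ++ [offset + i], acc.2 ++ [PySem.List.pyGetD tiled_shape i 0])
      else acc) pass1
  pass2

-- ===== PORT B =====
-- Single pass over enumerate(tiled_shape), four bucket lists, then concatenation.
def get_forward_permutation_alt (tiled_shape : List Int) (offset : Int) : List Int × List Int :=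
  let st := (PySem.List.enumerate tiled_shape 0).foldl
    (fun (st : (List Int × List Int) × (List Int × List Int)) (p : Int × Int) =>
      if PySem.Int.mod p.1 3 == 1 then
        (st.1, (st.2.1 ++ [offset + p.1], st.2.2 ++ [p.2]))
      else
        ((st.1.1 ++ [offset + p.1], st.1.2 ++ [p.2]), st.2))
    (([], []), ([], []))
  (st.1.1 ++ st.2.1, st.1.2 ++ st.2.2)

-- ===== PRECONDITION & SPEC =====
def Spec_get_forward_permutation (tiled_shape : List Int) (offset : Int) (out : List Int × List Int) : Prop := out = get_forward_permutation_alt tiled_shape offset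
instance (tiled_shape : List Int) (offset : Int) (out : List Int × List Int) : Decidable (Spec_get_forward_permutation tiled_shape offset out) := by unfold Spec_get_forward_permutation; infer_instance

-- ===== CLAIM (what is proved, stated in full; the proofs are below) =====
def Claim_equal_get_forward_permutation : Prop := ∀ (tiled_shape : List Int) (offset : Int), Dom_get_forward_permutation tiled_shape offset → Spec_get_forward_permutation tiled_shape offset (get_forward_permutation tiled_shape offset)

-- ===== LEMMAS AND PROOFS =====

-- A's per-pass fold (pair of lists) is an append of a filtered map.
theorem foldl_pair_if (p : Int → Bool) (f g : Int → Int) (l : List Int) :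
    ∀ a b : List Int,
      l.foldl (fun (acc : List Int × List Int) i =>
        if p i then (acc.1 ++ [f i], acc.2 ++ [g i]) else acc) (a, b)
      = (a ++ (l.filter p).map f, b ++ (l.filter p).map g) := by
  induction l with
  | nil => intro a b; simp
  | cons x xs ih =>
    intro a b
    by_cases h : p x = true <;> simp [List.foldl_cons, h, ih]

-- B's partitioning fold (two pairs of lists) appends filtered maps into both buckets.
theorem foldl_part (q : Int × Int → Bool) (f g : Int × Int → Int) (l : List (Int × Int)) :
    ∀ a b c d : List Int,
      l.foldl (fun (st : (List Int × List Int) × (List Int × List Int)) x =>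
        if q x then (st.1, (st.2.1 ++ [f x], st.2.2 ++ [g x]))
        else ((st.1.1 ++ [f x], st.1.2 ++ [g x]), st.2)) ((a, b), (c, d))
      = ((a ++ (l.filter (fun x => !q x)).map f, b ++ (l.filter (fun x => !q x)).map g),
         (c ++ (l.filter q).map f, d ++ (l.filter q).map g)) := by
  induction l with
  | nil => intro a b c d; simp
  | cons x xs ih =>
    intro a b c d
    by_cases h : q x = true <;> simp [List.foldl_cons, h, ih]

-- i % 3 (Python mod, positive divisor) is 0, 1 or 2, so 'in [0,2]' is the negation of '== 1'.
theorem cond_compl (i : Int) :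
    (i % 3 == 0 || i % 3 == 2) = !(i % 3 == 1) := by
  have h0 : 0 ≤ i % 3 := Int.emod_nonneg i (by norm_num)
  have h1 : i % 3 < 3 := Int.emod_lt_of_pos i (by norm_num)
  have : i % 3 = 0 ∨ i % 3 = 1 ∨ i % 3 = 2 := by omega
  rcases this with h | h | h <;> simp [h]

-- ===== VERDICT (by name: the statement is the Claim_ definition above) =====
theorem get_forward_permutation_spec : Claim_equal_get_forward_permutation := by
  intro ts off _
  unfold Spec_get_forward_permutation get_forward_permutation get_forward_permutation_alt
  rw [PySem.List.enumerate_eq_map_pyRange (d := 0)]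
  simp only [foldl_pair_if, foldl_part, PySem.List.len_eq,
    List.filter_map, List.map_map, Function.comp_def]
  have hm : ∀ i : Int, PySem.Int.mod i 3 = i % 3 :=
    fun i => PySem.Int.mod_eq_emod_of_pos (by norm_num)
  simp only [hm]
  have hc : (fun i : Int => i % 3 == 0 || i % 3 == 2)
      = (fun x : Int => !(x % 3 == 1)) := funext cond_compl
  rw [hc]
  rfl
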